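-- pv_equiv track=rewrite | github.com/flashbots/mev-inspect-py | backfill.py | get_block_after_before_chunks
-- ===== SOURCE A (Python) =====
-- from typing import Iterator, Tuple
--
-- def get_block_after_before_chunks(
--     after_block: int,
--     before_block: int,
--     n_workers: int,
-- ) -> Iterator[Tuple[int, int]]:
--     n_blocks = before_block - after_block
--     remainder = n_blocks % n_workers
--     floor_chunk_size = n_blocks // n_workers
--
--     last_before_block = None
--
--     for worker_index in range(n_workers):
--         chunk_size = floor_chunk_size
--
--         if worker_index < remainder:
--             chunk_size += 1
--
--         batch_after_block = (
--             last_before_block if last_before_block is not None else after_block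
--         )
--
--         batch_before_block = batch_after_block + chunk_size
--         yield batch_after_block, batch_before_block
--         last_before_block = batch_before_block
-- ===== SOURCE B (Python) =====
-- def get_block_after_before_chunks(after_block, before_block, n_workers):
--     n_blocks = before_block - after_block
--     remainder = n_blocks % n_workers
--     floor_chunk_size = n_blocks // n_workers
--     for i in range(n_workers):
--         start = after_block + i * floor_chunk_size + min(i, remainder)
--         yield start, start + floor_chunk_size + (1 if i < remainder else 0)
-- ===== Notes on version B (the rewrite author's own statement) =====
-- stated objective: simpler
-- what changed: Replaces the loop that threads a running last_before_block accumulator with a stateless closed-form boundary per worker: start_i = after_block + i*floor_chunk_size + min(i, remainder).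
import Mathlib
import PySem

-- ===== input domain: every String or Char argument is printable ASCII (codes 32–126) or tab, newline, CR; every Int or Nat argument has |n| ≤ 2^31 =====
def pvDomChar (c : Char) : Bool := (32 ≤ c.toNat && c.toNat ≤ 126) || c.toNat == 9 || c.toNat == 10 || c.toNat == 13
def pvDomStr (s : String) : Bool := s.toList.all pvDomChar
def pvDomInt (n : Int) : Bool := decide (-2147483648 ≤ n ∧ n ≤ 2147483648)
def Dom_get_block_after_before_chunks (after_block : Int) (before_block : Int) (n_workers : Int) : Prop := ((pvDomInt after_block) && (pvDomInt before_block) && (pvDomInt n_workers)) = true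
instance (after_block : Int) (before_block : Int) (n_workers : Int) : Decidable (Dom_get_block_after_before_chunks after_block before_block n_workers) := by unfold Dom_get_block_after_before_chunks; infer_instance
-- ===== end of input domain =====

-- B replaces A's running last_before_block accumulator with a stateless closed-form
-- boundary per worker index (objective: simpler; same O(n_workers) cost).

-- ===== PORT A =====
-- A threads state (last_before_block) through the loop over worker indices.
def get_block_after_before_chunks (after_block : Int) (before_block : Int) (n_workers : Int) : List (Int × Int) :=
  let n_blocks := before_block - after_block
  let remainder := PySem.Int.mod n_blocks n_workers
  let floor_chunk_size := PySem.Int.floordiv n_blocks n_workers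
  ((PySem.List.pyRange 0 n_workers 1).foldl
    (fun (st : List (Int × Int) × Option Int) worker_index =>
      let chunk_size := if worker_index < remainder then floor_chunk_size + 1 else floor_chunk_size
      let batch_after_block := match st.2 with
        | some last_before_block => last_before_block
        | none => after_block
      let batch_before_block := batch_after_block + chunk_size
      (st.1 ++ [(batch_after_block, batch_before_block)], some batch_before_block))
    ([], none)).1

-- ===== PORT B =====
-- B: closed-form start/end per worker index, no state between iterations.
def get_block_after_before_chunks_alt (after_block : Int) (before_block : Int) (n_workers : Int) : List (Int × Int) :=
  let n_blocks := before_block - after_block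
  let remainder := PySem.Int.mod n_blocks n_workers
  let floor_chunk_size := PySem.Int.floordiv n_blocks n_workers
  (PySem.List.pyRange 0 n_workers 1).map (fun i =>
    let start := after_block + i * floor_chunk_size + min i remainder
    (start, start + floor_chunk_size + (if i < remainder then 1 else 0)))

-- ===== PRECONDITION & SPEC =====
-- n_workers = 0 makes '%' and '//' raise ZeroDivisionError in Python A (and in B).
def Pre_get_block_after_before_chunks (after_block : Int) (before_block : Int) (n_workers : Int) : Prop := n_workers ≠ 0
instance (after_block : Int) (before_block : Int) (n_workers : Int) : Decidable (Pre_get_block_after_before_chunks after_block before_block n_workers) := by unfold Pre_get_block_after_before_chunks; infer_instance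
def pvWitness_get_block_after_before_chunks : Int × Int × Int := (10, 25, 4)

def Spec_get_block_after_before_chunks (after_block : Int) (before_block : Int) (n_workers : Int) (out : List (Int × Int)) : Prop := out = get_block_after_before_chunks_alt after_block before_block n_workers
instance (after_block : Int) (before_block : Int) (n_workers : Int) (out : List (Int × Int)) : Decidable (Spec_get_block_after_before_chunks after_block before_block n_workers out) := by unfold Spec_get_block_after_before_chunks; infer_instance

-- ===== CLAIM (what is proved, stated in full; the proofs are below) =====
def Claim_equal_get_block_after_before_chunks : Prop := ∀ (after_block : Int) (before_block : Int) (n_workers : Int), Dom_get_block_after_before_chunks after_block before_block n_workers → Pre_get_block_after_before_chunks after_block before_block n_workers → Spec_get_block_after_before_chunks after_block before_block n_workers (get_block_after_before_chunks after_block before_block n_workers)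

-- ===== LEMMAS AND PROOFS =====

-- The fold with the running 'last_before_block' computes, over range(0, n), the map of the
-- closed form, and its carried state after n steps is 'some (start of worker n)' (none for n = 0).
theorem pv_fold_closed_form (ab f r : Int) (hr : 0 ≤ r) (n : Nat) :
    ((PySem.List.pyRange 0 (n : Int) 1).foldl
      (fun (st : List (Int × Int) × Option Int) worker_index =>
        let chunk_size := if worker_index < r then f + 1 else f
        let batch_after_block := match st.2 with
          | some last_before_block => last_before_block
          | none => ab
        let batch_before_block := batch_after_block + chunk_size
        (st.1 ++ [(batch_after_block, batch_before_block)], some batch_before_block))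
      ([], none))
    = ((PySem.List.pyRange 0 (n : Int) 1).map (fun i =>
        let start := ab + i * f + min i r
        (start, start + f + (if i < r then 1 else 0))),
       if n = 0 then none else some (ab + (n : Int) * f + min (n : Int) r)) := by
  induction n with
  | zero => simp [PySem.List.pyRange_one_eq_nil]
  | succ n ih =>
    have h : PySem.List.pyRange 0 ((n + 1 : Nat) : Int) 1
        = PySem.List.pyRange 0 (n : Int) 1 ++ [(n : Int)] := by
      push_cast
      exact PySem.List.pyRange_one_succ_right (by positivity)
    rw [h, List.foldl_append, List.map_append, ih]
    simp only [List.foldl_cons, List.foldl_nil, List.map_cons, List.map_nil]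
    by_cases hne : n = 0
    · subst hne
      simp only [Nat.cast_zero, Nat.cast_one, Nat.zero_add, if_neg (Nat.succ_ne_zero 0), Prod.mk.injEq, List.append_cancel_left_eq, List.cons.injEq, and_true]
      push_cast
      rcases lt_or_ge (0 : Int) r with h' | h' <;>
        simp [min_def, h', le_of_lt] <;> constructor <;> first | omega | (intro; omega) | skip
      all_goals omega
    · simp only [if_neg hne, if_neg (Nat.succ_ne_zero n), Prod.mk.injEq, List.append_cancel_left_eq, List.cons.injEq, and_true]
      push_cast
      refine ⟨⟨trivial, by split_ifs <;> ring⟩, ?_⟩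
      rw [Option.some_inj]
      rcases lt_or_ge ((n : Int)) r with h' | h'
      · rw [if_pos h', min_eq_left (le_of_lt h'), min_eq_left (by omega)]; ring
      · rw [if_neg (not_lt.mpr h'), min_eq_right h', min_eq_right (by omega)]; ring

-- ===== VERDICT (by name: the statement is the Claim_ definition above) =====
theorem get_block_after_before_chunks_spec : Claim_equal_get_block_after_before_chunks := by
  intro after_block before_block n_workers _ _
  unfold Spec_get_block_after_before_chunks
  unfold get_block_after_before_chunks get_block_after_before_chunks_alt
  rcases lt_or_ge (0:Int) n_workers with hpos | h
  · have hr : 0 ≤ PySem.Int.mod (before_block - after_block) n_workers :=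
      PySem.Int.mod_nonneg _ hpos
    have hn : n_workers = ((n_workers.toNat : Nat) : Int) := by omega
    rw [hn] at hr ⊢
    dsimp only
    rw [pv_fold_closed_form _ _ _ hr]
  · simp [PySem.List.pyRange_one_eq_nil h]
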